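-- pv_equiv track=rewrite | github.com/jianfeiZhao/Data-Structure-and-Algorithms | SwordToOffer/63跳台阶.py | climbKSteps1
-- ===== SOURCE A (Python) =====
-- def climbKSteps1(n, k):
--   ls = [0 for i in range(k+1)]
--   ls[0] = 1
--   ls[1] = 1
--   for i in range(2, n+1):
--     for j in range(1, k):
--       if i-j < 0:
--         continue
--       ls[i%k] += ls[(i-j)%k]
--   return ls[n%k]
-- ===== SOURCE B (Python) =====
-- def climbKSteps1(n, k):
--     # Sliding-window reformulation: each step's new cell value equals the current
--     # running total S of the k-cell window, so the inner sum over k-1 terms is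
--     # replaced by the O(1) update S = 2*S - old.
--     if k == 1:
--         return 1
--     a = [1, 1] + [0] * (k - 2)
--     S = 2
--     for i in range(2, n + 1):
--         old = a[i % k]
--         a[i % k] = S
--         S = 2 * S - old
--     return a[n % k]
-- ===== Notes on version B (the rewrite author's own statement) =====
-- stated objective: faster
-- what changed: Replaces A's inner loop that re-sums k-1 circular-buffer cells at every step by a running window total S updated in O(1) per step (the new cell value is always S, and S becomes 2*S minus the overwritten cell), eliminating the inner loop entirely.
import Mathlib
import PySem

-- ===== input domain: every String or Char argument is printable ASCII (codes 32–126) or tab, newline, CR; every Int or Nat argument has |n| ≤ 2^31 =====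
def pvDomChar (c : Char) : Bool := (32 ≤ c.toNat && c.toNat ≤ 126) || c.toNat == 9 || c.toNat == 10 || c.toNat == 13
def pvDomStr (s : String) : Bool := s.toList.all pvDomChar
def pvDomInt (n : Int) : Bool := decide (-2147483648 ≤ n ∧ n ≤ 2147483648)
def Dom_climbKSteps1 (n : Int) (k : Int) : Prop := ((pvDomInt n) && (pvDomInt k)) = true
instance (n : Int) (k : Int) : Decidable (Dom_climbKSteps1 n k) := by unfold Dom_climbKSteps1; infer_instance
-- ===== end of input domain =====

-- B replaces A's inner re-summing loop over the k-cell circular buffer by a running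
-- window total updated in O(1) per step (measured asymptotically faster).


-- ===== PORT A =====
-- literal transliteration: list of k+1 zeros, ls[0]=ls[1]=1, nested loops, ls[i%k] += ls[(i-j)%k]
-- (all used indices are nonnegative, so pySetD/pyGetD are exact under Pre_).
def climbKSteps1 (n : Int) (k : Int) : Int :=
  let ls : List Int := (PySem.List.pyRange 0 (k+1) 1).map (fun _ => 0)
  let ls := PySem.List.pySetD ls 0 1
  let ls := PySem.List.pySetD ls 1 1
  let ls := (PySem.List.pyRange 2 (n+1) 1).foldl (fun ls i =>
    (PySem.List.pyRange 1 k 1).foldl (fun ls j =>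
      if i - j < 0 then ls
      else PySem.List.pySetD ls (PySem.Int.mod i k)
        (PySem.List.pyGetD ls (PySem.Int.mod i k) 0
          + PySem.List.pyGetD ls (PySem.Int.mod (i - j) k) 0)) ls) ls
  PySem.List.pyGetD ls (PySem.Int.mod n k) 0

-- ===== PORT B =====
-- sliding-window re-implementation: no inner loop, running window total S
def climbKSteps1_alt (n : Int) (k : Int) : Int :=
  if k = 1 then 1
  else
    let a : List Int := [1, 1] ++ List.replicate (k - 2).toNat 0
    let st := (PySem.List.pyRange 2 (n+1) 1).foldl (fun (st : List Int × Int) i =>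
      let old := PySem.List.pyGetD st.1 (PySem.Int.mod i k) 0
      (PySem.List.pySetD st.1 (PySem.Int.mod i k) st.2, 2 * st.2 - old)) (a, 2)
    PySem.List.pyGetD st.1 (PySem.Int.mod n k) 0

-- ===== PRECONDITION & SPEC =====
-- Pre_ excludes only k ≤ 0, on which Python A raises (IndexError on ls[0]/ls[1]).
def Pre_climbKSteps1 (_n : Int) (k : Int) : Prop := 1 ≤ k
instance (n : Int) (k : Int) : Decidable (Pre_climbKSteps1 n k) := by unfold Pre_climbKSteps1; infer_instance
def pvWitness_climbKSteps1 : Int × Int := (7, 3)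

def Spec_climbKSteps1 (n : Int) (k : Int) (out : Int) : Prop := out = climbKSteps1_alt n k
instance (n : Int) (k : Int) (out : Int) : Decidable (Spec_climbKSteps1 n k out) := by unfold Spec_climbKSteps1; infer_instance

-- ===== CLAIM (what is proved, stated in full; the proofs are below) =====
def Claim_equal_climbKSteps1 : Prop := ∀ (n : Int) (k : Int), Dom_climbKSteps1 n k → Pre_climbKSteps1 n k → Spec_climbKSteps1 n k (climbKSteps1 n k)

-- ===== LEMMAS AND PROOFS =====

-- proof-only names for the two loop bodies
def pvStepA (k i : Int) (ls : List Int) (j : Int) : List Int :=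
  if i - j < 0 then ls
  else PySem.List.pySetD ls (PySem.Int.mod i k)
    (PySem.List.pyGetD ls (PySem.Int.mod i k) 0
      + PySem.List.pyGetD ls (PySem.Int.mod (i - j) k) 0)

def pvStepB (k : Int) (st : List Int × Int) (i : Int) : List Int × Int :=
  let old := PySem.List.pyGetD st.1 (PySem.Int.mod i k) 0
  (PySem.List.pySetD st.1 (PySem.Int.mod i k) st.2, 2 * st.2 - old)

lemma pvPortA_eq (n k : Int) : climbKSteps1 n k =
    PySem.List.pyGetD
      ((PySem.List.pyRange 2 (n+1) 1).foldl
        (fun ls i => (PySem.List.pyRange 1 k 1).foldl (pvStepA k i) ls)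
        (PySem.List.pySetD (PySem.List.pySetD ((PySem.List.pyRange 0 (k+1) 1).map (fun _ => 0)) 0 1) 1 1))
      (PySem.Int.mod n k) 0 := rfl

lemma pvPortB_eq (n k : Int) (h : ¬ k = 1) : climbKSteps1_alt n k =
    PySem.List.pyGetD
      ((PySem.List.pyRange 2 (n+1) 1).foldl (pvStepB k)
        (([1, 1] ++ List.replicate (k - 2).toNat 0), 2)).1
      (PySem.Int.mod n k) 0 := by
  unfold climbKSteps1_alt pvStepB
  rw [if_neg h]

lemma pvGetD_nonneg (xs : List Int) (i : Int) (d : Int) (h : 0 ≤ i) :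
    PySem.List.pyGetD xs i d = xs.getD i.toNat d := by
  have := PySem.List.pyGetD_natCast xs i.toNat d
  rwa [Int.toNat_of_nonneg h] at this

lemma pvModNe (i j k : Int) (h1 : 1 ≤ j) (h2 : j < k) :
    ((i - j)% k).toNat ≠ (i% k).toNat := by
  have hne : (i - j)% k ≠ i% k := by
    intro h
    have h0 : (i - j - i) % k = 0 := Int.emod_eq_emod_iff_emod_sub_eq_zero.mp h
    have hd' : k ∣ j := by
      have he : i - j - i = -j := by ring
      rw [he] at h0
      exact (dvd_neg).mp (Int.dvd_of_emod_eq_zero h0)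
    have := Int.le_of_dvd (by omega) hd'
    omega
  have n1 : 0 ≤ (i - j)% k := Int.emod_nonneg _ (by omega)
  have n2 : 0 ≤ i% k := Int.emod_nonneg _ (by omega)
  omega

lemma pvSum_set (a : List Int) (r : Nat) (v : Int) (h : r < a.length) :
    (a.set r v).sum = a.sum - a.getD r 0 + v := by
  induction a generalizing r with
  | nil => simp at h
  | cons x t ih =>
    cases r with
    | zero => simp [List.getD]; ring
    | succ r =>
      have := ih r (by simpa using h)
      simp [List.set, this]; ring

lemma pvSum_range (a : List Int) :
    ∑ p ∈ Finset.range a.length, a.getD p 0 = a.sum := by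
  induction a with
  | nil => simp
  | cons x t ih =>
    rw [List.length_cons, Finset.sum_range_succ']
    simp only [List.getD_cons_succ, List.getD_cons_zero]
    rw [ih, List.sum_cons]
    ring

lemma pvSum_map_range (m : Nat) (f : Nat → Int) :
    ((List.range m).map f).sum = ∑ t ∈ Finset.range m, f t := by
  induction m with
  | zero => simp
  | succ m ih =>
    rw [List.range_succ, Finset.sum_range_succ, List.map_append, List.sum_append, ih]
    simp

-- A's inner loop in accumulated closed form (reads never hit the written cell)
lemma pvInnerAux (k i : Int) (hk : 0 < k) (js : List Int) (hjs : ∀ j ∈ js, 1 ≤ j ∧ j < k)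
    (ls : List Int) (hlen : (k : Int) ≤ (ls.length : Int)) (c : Int) :
    js.foldl (pvStepA k i) (ls.set (i% k).toNat (ls.getD (i% k).toNat 0 + c))
      = ls.set (i% k).toNat (ls.getD (i% k).toNat 0 + (c +
          (js.map (fun j => if i - j < 0 then 0 else ls.getD ((i - j)% k).toNat 0)).sum)) := by
  have hk0 : k ≠ 0 := by omega
  have hrlt : (i% k).toNat < ls.length := by
    have h1 := Int.emod_lt_of_pos i hk
    have h2 := Int.emod_nonneg i hk0
    omega
  induction js generalizing c with
  | nil => simp
  | cons j rest ih =>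
    have hj := hjs j (by simp)
    have hrest : ∀ x ∈ rest, 1 ≤ x ∧ x < k := fun x hx => hjs x (by simp [hx])
    rw [List.foldl_cons]
    by_cases hneg : i - j < 0
    · rw [show pvStepA k i (ls.set (i% k).toNat (ls.getD (i% k).toNat 0 + c)) j
            = ls.set (i% k).toNat (ls.getD (i% k).toNat 0 + c) from by
        unfold pvStepA; rw [if_pos hneg]]
      rw [ih hrest c, List.map_cons, List.sum_cons, if_pos hneg, zero_add]
    · have hstep : pvStepA k i (ls.set (i% k).toNat (ls.getD (i% k).toNat 0 + c)) j
          = ls.set (i% k).toNat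
              (ls.getD (i% k).toNat 0 + (c + ls.getD ((i - j)% k).toNat 0)) := by
        unfold pvStepA
        rw [if_neg hneg]
        rw [PySem.Int.mod_eq_emod_of_pos hk, PySem.Int.mod_eq_emod_of_pos hk]
        rw [PySem.List.pySetD_of_nonneg _ _ (Int.emod_nonneg i hk0)]
        rw [pvGetD_nonneg _ _ _ (Int.emod_nonneg i hk0)]
        rw [pvGetD_nonneg _ _ _ (Int.emod_nonneg (i - j) hk0)]
        rw [show ((ls.set (i% k).toNat (ls.getD (i% k).toNat 0 + c)).getD ((i - j)% k).toNat 0)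
              = ls.getD ((i - j)% k).toNat 0 from by
          simp [List.getD, List.getElem?_set_ne (Ne.symm (pvModNe i j k hj.1 hj.2))]]
        rw [show ((ls.set (i% k).toNat (ls.getD (i% k).toNat 0 + c)).getD (i% k).toNat 0)
              = ls.getD (i% k).toNat 0 + c from by
          rw [List.getD_eq_getElem _ _ (by simpa using hrlt), List.getElem_set_self (by simpa using hrlt)]]
        rw [List.set_set]
        congr 1
        ring
      rw [hstep, ih hrest]
      congr 2
      rw [List.map_cons, List.sum_cons, if_neg hneg]
      ring

-- the inner sum equals (window total) - (overwritten cell)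
lemma pvModCancel (i t k : Int) (ht : 0 ≤ t) (htk : t < k) :
    (i - (i - t) % k) % k = t := by
  conv_lhs => rw [Int.sub_emod]
  rw [Int.emod_emod_of_dvd _ dvd_rfl, ← Int.sub_emod]
  have he : i - (i - t) = t := by ring
  rw [he, Int.emod_eq_of_lt ht htk]

lemma pvInnerSum (k i : Int) (hk : 2 ≤ k) (hi : 2 ≤ i) (a : List Int) (hlen : (a.length : Int) = k)
    (htail : ∀ p : Nat, i ≤ (p : Int) → (p : Int) < k → a.getD p 0 = 0) :
    ((PySem.List.pyRange 1 k 1).map (fun j => if i - j < 0 then 0 else a.getD ((i - j)% k).toNat 0)).sum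
      = a.sum - a.getD (i% k).toNat 0 := by
  have hk0 : k ≠ 0 := by omega
  have hrpos : 0 ≤ i % k := Int.emod_nonneg i hk0
  have hrlt : i % k < k := Int.emod_lt_of_pos i (by omega)
  have hsum : ∑ p ∈ Finset.range k.toNat, a.getD p 0 = a.sum := by
    have := pvSum_range a
    rwa [show a.length = k.toNat from by omega] at this
  rw [PySem.List.pyRange_one 1 k, List.map_map, pvSum_map_range]
  simp only [Function.comp_apply]
  by_cases hbig : k - 1 ≤ i
  · -- every j = 1+t is admissible; reindex t ↦ (i-1-t) % k over all residues except i % k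
    have hcong : ∀ t ∈ Finset.range (k - 1).toNat,
        (if i - (1 + (t : Int)) < 0 then (0:Int) else a.getD ((i - (1 + (t : Int))) % k).toNat 0)
          = a.getD ((i - 1 - (t : Int)) % k).toNat 0 := by
      intro t htm
      simp only [Finset.mem_range] at htm
      have h1 : ¬ i - (1 + (t : Int)) < 0 := by omega
      rw [if_neg h1]
      congr 2
      ring_nf
    rw [Finset.sum_congr rfl hcong]
    have hbij : ∑ t ∈ Finset.range (k - 1).toNat, a.getD ((i - 1 - (t : Int)) % k).toNat 0
        = ∑ p ∈ (Finset.range k.toNat).erase (i % k).toNat, a.getD p 0 := by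
      refine Finset.sum_nbij' (fun t => ((i - 1 - (t : Int)) % k).toNat)
        (fun p => ((i - 1 - (p : Int)) % k).toNat) ?_ ?_ ?_ ?_ ?_
      · intro t htm
        simp only [Finset.mem_range] at htm
        have hne := pvModNe i (1 + (t : Int)) k (by omega) (by omega)
        have he : i - (1 + (t : Int)) = i - 1 - (t : Int) := by ring
        rw [he] at hne
        have h1 : 0 ≤ (i - 1 - (t : Int)) % k := Int.emod_nonneg _ hk0
        have h2 : (i - 1 - (t : Int)) % k < k := Int.emod_lt_of_pos _ (by omega)
        simp only [Finset.mem_erase, Finset.mem_range]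
        exact ⟨hne, by omega⟩
      · intro p hpm
        simp only [Finset.mem_erase, Finset.mem_range] at hpm
        have h1 : 0 ≤ (i - 1 - (p : Int)) % k := Int.emod_nonneg _ hk0
        have h2 : (i - 1 - (p : Int)) % k < k := Int.emod_lt_of_pos _ (by omega)
        -- the image avoids the top value k-1, for that would force p ≡ i (mod k)
        have hne : (i - 1 - (p : Int)) % k ≠ k - 1 := by
          intro hEq
          have h0 : (i - (p : Int)) % k = 0 := by
            have : i - (p : Int) = (i - 1 - (p : Int)) + 1 := by ring
            rw [this, Int.add_emod, hEq, Int.emod_eq_of_lt (a := 1) (b := k) (by omega) (by omega)]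
            have hkk : k - 1 + 1 = k := by ring
            rw [hkk, Int.emod_self]
          have hd : k ∣ i - (p : Int) := Int.dvd_of_emod_eq_zero h0
          have hmm : i % k = (p : Int) % k := by
            exact (Int.emod_eq_emod_iff_emod_sub_eq_zero.mpr h0)
          rw [Int.emod_eq_of_lt (a := (p : Int)) (b := k) (by omega) (by omega)] at hmm
          exact hpm.1 (by omega)
        simp only [Finset.mem_range]
        omega
      · intro t htm
        simp only [Finset.mem_range] at htm
        show ((i - 1 - ((((i - 1 - (t : Int)) % k).toNat : Nat) : Int)) % k).toNat = t
        have h1 : 0 ≤ (i - 1 - (t : Int)) % k := Int.emod_nonneg _ hk0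
        have hc : ((i - 1 - (((i - 1 - (t : Int)) % k).toNat : Int)) % k) = (t : Int) := by
          rw [Int.toNat_of_nonneg h1]
          exact pvModCancel (i - 1) (t : Int) k (by omega) (by omega)
        omega
      · intro p hpm
        simp only [Finset.mem_erase, Finset.mem_range] at hpm
        show ((i - 1 - ((((i - 1 - (p : Int)) % k).toNat : Nat) : Int)) % k).toNat = p
        have h1 : 0 ≤ (i - 1 - (p : Int)) % k := Int.emod_nonneg _ hk0
        have hc : ((i - 1 - (((i - 1 - (p : Int)) % k).toNat : Int)) % k) = (p : Int) := by
          rw [Int.toNat_of_nonneg h1]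
          exact pvModCancel (i - 1) (p : Int) k (by omega) (by omega)
        omega
      · intro t htm
        rfl
    rw [hbij, Finset.sum_erase_eq_sub (by simp only [Finset.mem_range]; omega), hsum]
  · -- early phase: only j ≤ i contributes, indices do not wrap, tail cells are zero
    rw [not_le] at hbig
    have hr : i % k = i := Int.emod_eq_of_lt (a := i) (b := k) (by omega) (by omega)
    have hcong : ∀ t ∈ Finset.range (k - 1).toNat,
        (if i - (1 + (t : Int)) < 0 then (0:Int) else a.getD ((i - (1 + (t : Int))) % k).toNat 0)
          = (if (t : Int) ≤ i - 1 then a.getD (i.toNat - 1 - t) 0 else 0) := by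
      intro t htm
      by_cases hle : (t : Int) ≤ i - 1
      · rw [if_pos hle, if_neg (by omega)]
        have he : i - (1 + (t : Int)) = i - 1 - (t : Int) := by ring
        rw [he, Int.emod_eq_of_lt (a := i - 1 - (t : Int)) (b := k) (by omega) (by omega)]
        congr 1
        omega
      · rw [if_neg hle, if_pos (by omega)]
    rw [Finset.sum_congr rfl hcong]
    have hss : Finset.range i.toNat ⊆ Finset.range (k - 1).toNat :=
      Finset.range_subset_range.mpr (by omega)
    have hsub := Finset.sum_subset hss
      (f := fun t : Nat => if (t : Int) ≤ i - 1 then a.getD (i.toNat - 1 - t) 0 else (0:Int))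
      (fun x hx hnx => by
        simp only [Finset.mem_range] at hx hnx
        show (if (x : Int) ≤ i - 1 then a.getD (i.toNat - 1 - x) 0 else (0:Int)) = 0
        rw [if_neg (by omega)])
    rw [← hsub]
    rw [Finset.sum_congr rfl (fun t htm => by
      simp only [Finset.mem_range] at htm
      show (if (t : Int) ≤ i - 1 then a.getD (i.toNat - 1 - t) 0 else (0:Int)) = a.getD (i.toNat - 1 - t) 0
      rw [if_pos (by omega)])]
    rw [Finset.sum_range_reflect (fun p => a.getD p 0) i.toNat]
    have hss2 : Finset.range i.toNat ⊆ Finset.range k.toNat :=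
      Finset.range_subset_range.mpr (by omega)
    have hext := Finset.sum_subset hss2 (f := fun p => a.getD p 0)
      (fun p hp hnp => by
        simp only [Finset.mem_range] at hp hnp
        exact htail p (by omega) (by omega))
    rw [hext]
    have hz : a.getD (i % k).toNat 0 = 0 := by
      rw [hr]
      exact htail i.toNat (by omega) (by omega)
    rw [hsum, hz, sub_zero]

-- closed form of one full pass of A's inner loop
lemma pvInnerFold (k i : Int) (hk : 0 < k) (ls : List Int)
    (hlen : (k : Int) ≤ (ls.length : Int)) :
    (PySem.List.pyRange 1 k 1).foldl (pvStepA k i) ls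
      = ls.set (i % k).toNat (ls.getD (i % k).toNat 0 +
          ((PySem.List.pyRange 1 k 1).map
            (fun j => if i - j < 0 then 0 else ls.getD ((i - j) % k).toNat 0)).sum) := by
  have hk0 : k ≠ 0 := by omega
  have hrlt : (i % k).toNat < ls.length := by
    have h1 := Int.emod_lt_of_pos i (show 0 < k by omega)
    have h2 := Int.emod_nonneg i hk0
    omega
  have hbase : ls = ls.set (i % k).toNat (ls.getD (i % k).toNat 0 + 0) := by
    rw [add_zero, List.getD_eq_getElem _ _ hrlt, List.set_getElem_self]
  conv_lhs => rw [hbase]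
  rw [pvInnerAux k i hk _ (fun j hj => by
      rw [PySem.List.mem_pyRange_one] at hj; exact ⟨hj.1, hj.2⟩) ls hlen 0]
  rw [zero_add]

-- outer loops in lockstep
lemma pvOuter (k n : Int) (hk : 2 ≤ k) :
    ∀ (m : Nat) (i : Int), 2 ≤ i → (n + 1 - i).toNat = m →
    ∀ (a : List Int) (S : Int), (a.length : Int) = k → S = a.sum →
    (∀ p : Nat, i ≤ (p : Int) → (p : Int) < k → a.getD p 0 = 0) →
    (PySem.List.pyRange i (n+1) 1).foldl
        (fun ls i => (PySem.List.pyRange 1 k 1).foldl (pvStepA k i) ls) (a ++ [0])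
      = ((PySem.List.pyRange i (n+1) 1).foldl (pvStepB k) (a, S)).1 ++ [0]
    ∧ (((PySem.List.pyRange i (n+1) 1).foldl (pvStepB k) (a, S)).1.length : Int) = k
    ∧ ((PySem.List.pyRange i (n+1) 1).foldl (pvStepB k) (a, S)).2
        = ((PySem.List.pyRange i (n+1) 1).foldl (pvStepB k) (a, S)).1.sum := by
  intro m
  induction m with
  | zero =>
    intro i hi hm a S hlen hS htail
    rw [PySem.List.pyRange_one_eq_nil (by omega : n + 1 ≤ i)]
    exact ⟨rfl, by simpa using hlen, by simpa using hS⟩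
  | succ m ih =>
    intro i hi hm a S hlen hS htail
    have hk0 : k ≠ 0 := by omega
    have hlt : i < n + 1 := by omega
    have hrpos : 0 ≤ i % k := Int.emod_nonneg i hk0
    have hrlt : i % k < k := Int.emod_lt_of_pos i (by omega)
    have hra : (i % k).toNat < a.length := by omega
    rw [PySem.List.pyRange_one_cons hlt, List.foldl_cons, List.foldl_cons]
    -- one step of A
    have hls : (k : Int) ≤ ((a ++ [0]).length : Int) := by
      rw [List.length_append]
      push_cast
      omega
    have hA : (PySem.List.pyRange 1 k 1).foldl (pvStepA k i) (a ++ [0])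
        = (a.set (i % k).toNat a.sum) ++ [0] := by
      rw [pvInnerFold k i (by omega) (a ++ [0]) hls]
      have hmapeq : List.map (fun j => if i - j < 0 then (0:Int) else (a ++ [0]).getD ((i - j) % k).toNat 0) (PySem.List.pyRange 1 k 1)
          = List.map (fun j => if i - j < 0 then (0:Int) else a.getD ((i - j) % k).toNat 0) (PySem.List.pyRange 1 k 1) :=
        List.map_congr_left (fun j hj => by
          rw [PySem.List.mem_pyRange_one] at hj
          have hjr : ((i - j) % k).toNat < a.length := by
            have h1 := Int.emod_nonneg (i - j) hk0
            have h2 := Int.emod_lt_of_pos (i - j) (show 0 < k by omega)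
            omega
          rw [List.getD_append _ _ _ _ hjr])
      rw [hmapeq, pvInnerSum k i hk hi a hlen htail]
      rw [List.getD_append _ _ _ _ hra]
      rw [List.set_append_left _ _ hra]
      congr 2
      ring
    -- one step of B
    have hB : pvStepB k (a, S) i = (a.set (i % k).toNat a.sum, 2 * S - a.getD (i % k).toNat 0) := by
      unfold pvStepB
      show (PySem.List.pySetD a (PySem.Int.mod i k) S, 2 * S - PySem.List.pyGetD a (PySem.Int.mod i k) 0)
          = (a.set (i % k).toNat a.sum, 2 * S - a.getD (i % k).toNat 0)
      rw [PySem.Int.mod_eq_emod_of_pos (by omega), PySem.List.pySetD_of_nonneg _ _ hrpos,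
        pvGetD_nonneg _ _ _ hrpos, hS]
    rw [hA, hB]
    refine ih (i + 1) (by omega) (by omega) _ _ (by rw [List.length_set]; omega) ?_ ?_
    · rw [pvSum_set _ _ _ hra, hS]
      ring
    · intro p hp1 hp2
      have hpr : p ≠ (i % k).toNat := by
        by_cases hik : i < k
        · rw [Int.emod_eq_of_lt (a := i) (b := k) (by omega) (by omega)]
          omega
        · omega
      rw [List.getD, List.getElem?_set_ne (Ne.symm hpr), ← List.getD]
      exact htail p (by omega) hp2

lemma pvFoldlId (l : List Int) (init : List Int) :
    l.foldl (fun s (_ : Int) => s) init = init := by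
  induction l generalizing init with
  | nil => rfl
  | cons x t ih => exact ih init

lemma pvGetD_append_big (a b : List Int) (p : Nat) (d : Int) (h : a.length ≤ p) :
    (a ++ b).getD p d = b.getD (p - a.length) d := by
  induction a generalizing p with
  | nil => simp
  | cons x t ih =>
    cases p with
    | zero => simp at h
    | succ p => simpa using ih p (by simpa using h)

-- ===== VERDICT (by name: the statement is the Claim_ definition above) =====
theorem climbKSteps1_spec : Claim_equal_climbKSteps1 := by
  unfold Claim_equal_climbKSteps1
  intro n k _ hpre
  unfold Pre_climbKSteps1 at hpre
  unfold Spec_climbKSteps1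
  by_cases hk1 : k = 1
  · -- k = 1: A's inner loop is empty, the buffer stays [1, 1]; B returns 1
    subst hk1
    have hB : climbKSteps1_alt n 1 = 1 := by unfold climbKSteps1_alt; rw [if_pos rfl]
    rw [pvPortA_eq, hB]
    have hmod : PySem.Int.mod n 1 = 0 := by
      rw [PySem.Int.mod_eq_emod_of_pos (by omega), Int.emod_one]
    have hinit : PySem.List.pySetD (PySem.List.pySetD
        ((PySem.List.pyRange 0 (1+1) 1).map (fun _ => (0:Int))) 0 1) 1 1 = [1, 1] := by decide
    have hnil : PySem.List.pyRange 1 1 1 = [] := PySem.List.pyRange_one_eq_nil le_rfl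
    simp only [hinit, hnil, List.foldl_nil]
    rw [pvFoldlId, hmod]
    rfl
  · -- k ≥ 2: the two loops stay in lockstep (pvOuter)
    have hk : 2 ≤ k := by omega
    have hk0 : k ≠ 0 := by omega
    rw [pvPortA_eq, pvPortB_eq n k hk1]
    -- A's initial buffer is B's initial window plus the never-touched extra cell
    have hinit : PySem.List.pySetD (PySem.List.pySetD
        ((PySem.List.pyRange 0 (k+1) 1).map (fun _ => (0:Int))) 0 1) 1 1
        = ([1, 1] ++ List.replicate (k - 2).toNat 0) ++ [0] := by
      rw [List.map_const', PySem.List.length_pyRange_one]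
      rw [PySem.List.pySetD_of_nonneg _ _ (by omega : (0:Int) ≤ 0)]
      rw [PySem.List.pySetD_of_nonneg _ _ (by omega : (0:Int) ≤ 1)]
      have h1 : (k + 1 - 0).toNat = ((k - 2).toNat + 1) + 2 := by omega
      rw [h1]
      have h2 : List.replicate (((k - 2).toNat + 1) + 2) (0:Int)
          = 0 :: 0 :: (List.replicate (k - 2).toNat 0 ++ [0]) := by
        simp only [List.replicate_succ]
        rw [← List.replicate_succ, List.replicate_succ']
      rw [h2]
      rfl
    have hlen0 : ((([1, 1] ++ List.replicate (k - 2).toNat 0 : List Int)).length : Int) = k := by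
      rw [List.length_append, List.length_replicate]
      simp only [List.length_cons, List.length_nil]
      push_cast
      omega
    have hsum0 : (2:Int) = (([1, 1] ++ List.replicate (k - 2).toNat 0 : List Int)).sum := by
      rw [List.sum_append, List.sum_replicate]
      simp
    have htail0 : ∀ p : Nat, (2:Int) ≤ (p : Int) → (p : Int) < k →
        (([1, 1] ++ List.replicate (k - 2).toNat 0 : List Int)).getD p 0 = 0 := by
      intro p hp1 hp2
      rw [pvGetD_append_big _ _ _ _ (by simp only [List.length_cons, List.length_nil]; omega)]
      exact List.getD_replicate _ (by simp only [List.length_cons, List.length_nil]; omega)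
    obtain ⟨hEq, hLen, -⟩ := pvOuter k n hk (n + 1 - 2).toNat 2 (by omega) rfl
      ([1, 1] ++ List.replicate (k - 2).toNat 0) 2 hlen0 hsum0 htail0
    rw [hinit, hEq]
    have hrpos : 0 ≤ PySem.Int.mod n k := by
      rw [PySem.Int.mod_eq_emod_of_pos (by omega)]
      exact Int.emod_nonneg n hk0
    have hrlt : (PySem.Int.mod n k).toNat
        < ((PySem.List.pyRange 2 (n+1) 1).foldl (pvStepB k)
            (([1, 1] ++ List.replicate (k - 2).toNat 0), 2)).1.length := by
      rw [PySem.Int.mod_eq_emod_of_pos (by omega)]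
      have := Int.emod_lt_of_pos n (show 0 < k by omega)
      have := Int.emod_nonneg n hk0
      omega
    rw [pvGetD_nonneg _ _ _ hrpos, pvGetD_nonneg _ _ _ hrpos]
    rw [List.getD_append _ _ _ _ hrlt]
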